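-- pv_equiv track=rewrite | github.com/SkyEye-FAST/unifont_utils | unifont_utils/diff.py | replace_pattern
-- ===== SOURCE A (Python) =====
-- from typing import List, Union
--
-- def replace_pattern(img_data, pattern_a, pattern_b, pattern_width) -> List[int]:
--     """Replaces a pattern in an image with another pattern.
--
--     Args:
--         img_data (List[int]): The image data to be modified.
--         pattern_a (List[int]): The pattern to be replaced.
--         pattern_b (List[int]): The new pattern to replace the old one.
--         pattern_width (int): The width of the patterns.
--
--     Returns:
--         List[int]: The modified image data.
--
--     Raises:
--         ValueError: If the two patterns have different sizes.
--     """
--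
--     if len(pattern_a) != len(pattern_b):
--         raise ValueError("The two patterns must have the same size.")
--     image_width = len(img_data) // 16
--     pattern_height = len(pattern_a) // pattern_width
--
--     def match_pattern(img_data, pattern_a, i, j):
--         for y in range(pattern_height):
--             for x in range(pattern_width):
--                 if (
--                     pattern_a[y * pattern_width + x] == 1
--                     and img_data[(i + y) * image_width + (j + x)] != 1
--                 ):
--                     return False
--         return True
--
--     def apply_new_pattern(img_data, pattern_a, pattern_b, i, j):
--         for y in range(pattern_height):
--             for x in range(pattern_width):
--                 if pattern_b[y * pattern_width + x] == 1:
--                     img_data[(i + y) * image_width + (j + x)] = 1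
--                 elif (
--                     pattern_b[y * pattern_width + x] == 0
--                     and pattern_a[y * pattern_width + x] == 1
--                 ):
--                     continue
--
--     for i in range(16 - pattern_height + 1):
--         for j in range(image_width - pattern_width + 1):
--             if match_pattern(img_data, pattern_a, i, j):
--                 apply_new_pattern(img_data, pattern_a, pattern_b, i, j)
--
--     return img_data
-- ===== SOURCE B (Python) =====
-- def replace_pattern(img_data, pattern_a, pattern_b, pattern_width):
--     """Bit-packed re-implementation: the 16-row grid is packed into 16 integers
--     (bit k of row r = whether cell r*w+k equals 1); the patterns are packed into
--     per-row (required, set) bitmasks once, so matching a position is a shift/AND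
--     per pattern row and applying is a shift/OR.  Mutates img_data in place (only
--     writes 1 into stamped cells) and returns it, like the original."""
--     if len(pattern_a) != len(pattern_b):
--         raise ValueError("The two patterns must have the same size.")
--     w = len(img_data) // 16
--     h = len(pattern_a) // pattern_width
--     rows = []
--     for r in range(16):
--         acc = 0
--         for k in range(w):
--             if img_data[r * w + k] == 1:
--                 acc |= 1 << k
--         rows.append(acc)
--     masks = []
--     for y in range(h):
--         ra = 0
--         rb = 0
--         for x in range(pattern_width):
--             if pattern_a[y * pattern_width + x] == 1:
--                 ra |= 1 << x
--             if pattern_b[y * pattern_width + x] == 1: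
--                 rb |= 1 << x
--         masks.append((ra, rb))
--     for i in range(16 - h + 1):
--         for j in range(w - pattern_width + 1):
--             if all((rows[i + y] >> j) & masks[y][0] == masks[y][0] for y in range(h)):
--                 for y in range(h):
--                     rows[i + y] |= masks[y][1] << j
--     for r in range(16):
--         for k in range(w):
--             if (rows[r] >> k) & 1:
--                 img_data[r * w + k] = 1
--     return img_data
-- ===== Notes on version B (the rewrite author's own statement) =====
-- stated objective: alternative
-- what changed: B changes the data structure: it packs the 16-row grid into 16 row-bitmask integers and each pattern into per-row (required, set) bitmasks, so a position is matched with one shift/AND comparison per pattern row and stamped with one shift/OR per row, and the 0/1 bits are written back at the end, instead of A's per-cell nested y/x scans with in-place cell writes.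
import Mathlib
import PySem

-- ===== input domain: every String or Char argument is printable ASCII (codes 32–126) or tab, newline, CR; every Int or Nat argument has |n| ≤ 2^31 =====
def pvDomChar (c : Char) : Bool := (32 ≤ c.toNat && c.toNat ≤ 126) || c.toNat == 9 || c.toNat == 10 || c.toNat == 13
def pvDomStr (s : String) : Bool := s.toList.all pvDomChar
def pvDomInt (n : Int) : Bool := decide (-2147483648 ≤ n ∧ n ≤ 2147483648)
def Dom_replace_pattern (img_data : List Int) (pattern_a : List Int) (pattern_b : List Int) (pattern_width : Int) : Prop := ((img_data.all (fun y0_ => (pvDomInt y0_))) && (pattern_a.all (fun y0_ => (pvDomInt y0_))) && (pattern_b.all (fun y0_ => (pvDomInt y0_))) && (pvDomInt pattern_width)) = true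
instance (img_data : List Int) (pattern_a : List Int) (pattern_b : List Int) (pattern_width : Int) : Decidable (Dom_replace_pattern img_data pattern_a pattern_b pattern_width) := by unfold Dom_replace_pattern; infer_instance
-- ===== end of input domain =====

-- B re-implements A on a packed-bitmap representation: the 16-row grid becomes 16 integers of
-- row bits and each pattern row a (required, set) bitmask, so matching is shift/AND and stamping
-- is shift/OR per row (alternative data structure; equivalence is about the return value — both
-- Pythons mutate img_data in place).


-- ===== PORT A =====
def replace_pattern (img_data : List Int) (pattern_a : List Int) (pattern_b : List Int) (pattern_width : Int) : List Int :=
  let image_width : Int := PySem.Int.floordiv (img_data.length : Int) 16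
  let pattern_height : Int := PySem.Int.floordiv (pattern_a.length : Int) pattern_width
  -- match_pattern: nested loops with early 'return False' = all cells pass
  let matchPattern (img : List Int) (i j : Int) : Bool :=
    (PySem.List.pyRange 0 pattern_height 1).all fun y =>
      (PySem.List.pyRange 0 pattern_width 1).all fun x =>
        !(PySem.List.pyGetD pattern_a (y * pattern_width + x) 0 == 1
          && !(PySem.List.pyGetD img ((i + y) * image_width + (j + x)) 0 == 1))
  -- apply_new_pattern: the elif branch is 'continue', a no-op
  let applyNewPattern (img : List Int) (i j : Int) : List Int :=
    (PySem.List.pyRange 0 pattern_height 1).foldl (fun img y =>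
      (PySem.List.pyRange 0 pattern_width 1).foldl (fun img x =>
        if PySem.List.pyGetD pattern_b (y * pattern_width + x) 0 == 1 then
          PySem.List.pySetD img ((i + y) * image_width + (j + x)) 1
        else img) img) img
  (PySem.List.pyRange 0 (16 - pattern_height + 1) 1).foldl (fun img i =>
    (PySem.List.pyRange 0 (image_width - pattern_width + 1) 1).foldl (fun img j =>
      if matchPattern img i j then applyNewPattern img i j else img) img) img_data

-- ===== PORT B =====
-- rows/masks hold nonnegative Python ints used purely bitwise; they are represented as Nat,
-- exact for Python's <<, >>, |, & on nonnegative values (shift amounts are the nonnegative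
-- loop indices, taken as Nat via .toNat).
def replace_pattern_alt (img_data : List Int) (pattern_a : List Int) (pattern_b : List Int) (pattern_width : Int) : List Int :=
  let w : Int := PySem.Int.floordiv (img_data.length : Int) 16
  let h : Int := PySem.Int.floordiv (pattern_a.length : Int) pattern_width
  let rows0 : List Nat := (PySem.List.pyRange 0 16 1).map (fun r =>
      (PySem.List.pyRange 0 w 1).foldl (fun acc k =>
        if PySem.List.pyGetD img_data (r * w + k) 0 == 1 then acc ||| (1 <<< k.toNat) else acc) 0)
  let masks : List (Nat × Nat) := (PySem.List.pyRange 0 h 1).map (fun y =>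
      (PySem.List.pyRange 0 pattern_width 1).foldl (fun rab x =>
        (if PySem.List.pyGetD pattern_a (y * pattern_width + x) 0 == 1 then rab.1 ||| (1 <<< x.toNat) else rab.1,
         if PySem.List.pyGetD pattern_b (y * pattern_width + x) 0 == 1 then rab.2 ||| (1 <<< x.toNat) else rab.2)) (0, 0))
  let rows := (PySem.List.pyRange 0 (16 - h + 1) 1).foldl (fun rows i =>
      (PySem.List.pyRange 0 (w - pattern_width + 1) 1).foldl (fun rows j =>
        if (PySem.List.pyRange 0 h 1).all (fun y =>
            ((PySem.List.pyGetD rows (i + y) 0) >>> j.toNat) &&& (PySem.List.pyGetD masks y (0, 0)).1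
              == (PySem.List.pyGetD masks y (0, 0)).1) then
          (PySem.List.pyRange 0 h 1).foldl (fun rows y =>
            PySem.List.pySetD rows (i + y)
              ((PySem.List.pyGetD rows (i + y) 0) ||| ((PySem.List.pyGetD masks y (0, 0)).2 <<< j.toNat))) rows
        else rows) rows) rows0
  (PySem.List.pyRange 0 16 1).foldl (fun img r =>
      (PySem.List.pyRange 0 w 1).foldl (fun img k =>
        if ((PySem.List.pyGetD rows r 0) >>> k.toNat) &&& 1 == 1 then
          PySem.List.pySetD img (r * w + k) 1
        else img) img) img_data

-- ===== PRECONDITION & SPEC =====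
-- Pre_ excludes exactly the inputs where the Python A raises: ValueError when the two patterns
-- differ in length, ZeroDivisionError when pattern_width = 0. Nothing else is excluded.
def Pre_replace_pattern (img_data : List Int) (pattern_a : List Int) (pattern_b : List Int) (pattern_width : Int) : Prop :=
  pattern_a.length = pattern_b.length ∧ pattern_width ≠ 0
instance (img_data : List Int) (pattern_a : List Int) (pattern_b : List Int) (pattern_width : Int) : Decidable (Pre_replace_pattern img_data pattern_a pattern_b pattern_width) := by unfold Pre_replace_pattern; infer_instance

def pvWitness_replace_pattern : List Int × List Int × List Int × Int :=
  ([1, 0, 0, 1, 0, 0, 0, 0, 0, 0, 0, 0, 0, 0, 0, 0], [1], [1], 1)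

def Spec_replace_pattern (img_data : List Int) (pattern_a : List Int) (pattern_b : List Int) (pattern_width : Int) (out : List Int) : Prop := out = replace_pattern_alt img_data pattern_a pattern_b pattern_width
instance (img_data : List Int) (pattern_a : List Int) (pattern_b : List Int) (pattern_width : Int) (out : List Int) : Decidable (Spec_replace_pattern img_data pattern_a pattern_b pattern_width out) := by unfold Spec_replace_pattern; infer_instance

-- ===== CLAIM (what is proved, stated in full; the proofs are below) =====
def Claim_equal_replace_pattern : Prop := ∀ (img_data : List Int) (pattern_a : List Int) (pattern_b : List Int) (pattern_width : Int), Dom_replace_pattern img_data pattern_a pattern_b pattern_width → Pre_replace_pattern img_data pattern_a pattern_b pattern_width → Spec_replace_pattern img_data pattern_a pattern_b pattern_width (replace_pattern img_data pattern_a pattern_b pattern_width)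

-- ===== LEMMAS AND PROOFS =====

-- getD after a single set
theorem pvGetD_set {α : Type} (l : List α) (i j : Nat) (a d : α) :
    (l.set i a).getD j d = if i = j ∧ i < l.length then a else l.getD j d := by
  simp only [List.getD_eq_getElem?_getD, List.getElem?_set]
  split_ifs with h1 h2 h3 h4 <;> simp_all <;> try omega

-- the bit-packing loop of row r of list l (width w): bit k = (l[r*w+k] == 1)
def pvPack (l : List Int) (w r : Nat) : Nat :=
  (List.range w).foldl (fun acc k => if l.getD (r*w+k) 0 == 1 then acc ||| (1 <<< k) else acc) 0

theorem pvPackBit (g : Nat → Bool) (m : Nat) : ∀ (acc t : Nat),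
    ((List.range m).foldl (fun acc k => if g k then acc ||| (1 <<< k) else acc) acc).testBit t
      = (acc.testBit t || (decide (t < m) && g t)) := by
  induction m with
  | zero => intro acc t; simp
  | succ n ih =>
    intro acc t
    rw [List.range_succ, List.foldl_append]
    simp only [List.foldl_cons, List.foldl_nil]
    by_cases hg : g n
    · rw [if_pos hg, Nat.testBit_or, ih, Nat.shiftLeft_eq, one_mul, Nat.testBit_two_pow]
      by_cases ht : t = n
      · subst ht; simp [hg]
      · simp [show (t < n+1) ↔ (t < n) from by omega, Ne.symm ht]
    · rw [if_neg hg, ih]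
      by_cases ht : t = n
      · subst ht; simp [hg]
      · simp [show (t < n+1) ↔ (t < n) from by omega]

theorem pvPack_testBit (l : List Int) (w r t : Nat) :
    (pvPack l w r).testBit t = (decide (t < w) && (l.getD (r*w+t) 0 == 1)) := by
  unfold pvPack
  rw [pvPackBit (fun k => l.getD (r*w+k) 0 == 1) w 0 t]
  simp

theorem pvLandEq (a b : Nat) : (a &&& b = b) ↔ (∀ t, b.testBit t = true → a.testBit t = true) := by
  constructor
  · intro h t hb
    have := congrArg (fun x => x.testBit t) h
    simp only [Nat.testBit_land, hb, Bool.and_true] at this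
    exact this
  · intro h
    apply Nat.eq_of_testBit_eq
    intro t
    rw [Nat.testBit_land]
    cases hb : b.testBit t
    · simp
    · simp [h t hb]

theorem pvAndOne (a : Nat) : (a &&& 1 = 1) ↔ a.testBit 0 = true := by
  simp [Nat.and_one_is_mod, Nat.testBit_zero]

-- grid-index decomposition is unique
theorem pvGridInj {r k r' k' w : Nat} (hk : k < w) (hk' : k' < w) (h : r*w+k = r'*w+k') :
    r = r' ∧ k = k' := by
  have hw : 0 < w := by omega
  have h1 : (r*w+k) / w = r := by
    rw [show r*w+k = k + w*r by ring, Nat.add_mul_div_left _ _ hw, Nat.div_eq_of_lt hk]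
    omega
  have h2 : (r'*w+k') / w = r' := by
    rw [show r'*w+k' = k' + w*r' by ring, Nat.add_mul_div_left _ _ hw, Nat.div_eq_of_lt hk']
    omega
  have hr : r = r' := by rw [← h1, ← h2, h]
  exact ⟨hr, by subst hr; omega⟩

-- a fold of conditional set-to-1 steps, pointwise, and its length
theorem pvSetFold_len {γ : Type} (c : γ → Bool) (tgt : γ → Nat) :
    ∀ (l : List γ) (img : List Int),
    (l.foldl (fun im e => if c e then im.set (tgt e) (1:Int) else im) img).length = img.length := by
  intro l
  induction l with
  | nil => intro img; rfl
  | cons e l ih =>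
    intro img
    simp only [List.foldl_cons]
    rw [ih]
    split <;> simp

theorem pvSetFold_getD {γ : Type} (c : γ → Bool) (tgt : γ → Nat) :
    ∀ (l : List γ) (img : List Int) (q : Nat),
    (l.foldl (fun im e => if c e then im.set (tgt e) (1:Int) else im) img).getD q 0
      = if ∃ e, e ∈ l ∧ c e = true ∧ tgt e = q ∧ q < img.length then 1 else img.getD q 0 := by
  intro l
  induction l with
  | nil => intro img q; simp
  | cons e l ih =>
    intro img q
    have hlen : (if c e = true then img.set (tgt e) (1:Int) else img).length = img.length := by
      split <;> simp
    simp only [List.foldl_cons]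
    rw [ih, hlen]
    by_cases h1 : ∃ e', e' ∈ l ∧ c e' = true ∧ tgt e' = q ∧ q < img.length
    · have hfull : ∃ e', e' ∈ e :: l ∧ c e' = true ∧ tgt e' = q ∧ q < img.length := by
        obtain ⟨e', he', hc, ht, hq⟩ := h1
        exact ⟨e', List.mem_cons_of_mem _ he', hc, ht, hq⟩
      rw [if_pos h1, if_pos hfull]
    · rw [if_neg h1]
      by_cases hh : c e = true ∧ tgt e = q ∧ q < img.length
      · have hfull : ∃ e', e' ∈ e :: l ∧ c e' = true ∧ tgt e' = q ∧ q < img.length :=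
          ⟨e, List.mem_cons_self, hh.1, hh.2.1, hh.2.2⟩
        have hset : tgt e = q ∧ tgt e < img.length := ⟨hh.2.1, by rw [hh.2.1]; exact hh.2.2⟩
        rw [if_pos hfull, if_pos hh.1, pvGetD_set, if_pos hset]
      · have hfull : ¬ ∃ e', e' ∈ e :: l ∧ c e' = true ∧ tgt e' = q ∧ q < img.length := by
          intro ⟨e', he', hc, ht, hq⟩
          rcases List.mem_cons.mp he' with rfl | hm
          · exact hh ⟨hc, ht, hq⟩
          · exact h1 ⟨e', hm, hc, ht, hq⟩
        rw [if_neg hfull]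
        by_cases hc : c e = true
        · have hset : ¬ (tgt e = q ∧ tgt e < img.length) := by
            intro ⟨ht, hq⟩
            exact hh ⟨hc, ht, by rw [← ht]; exact hq⟩
          rw [if_pos hc, pvGetD_set, if_neg hset]
        · rw [if_neg hc]

-- a fold of read-OR-write steps on the row list: length and bits
theorem pvOrFold_len (tgt msk : Nat → Nat) :
    ∀ (l : List Nat) (rows : List Nat),
    (l.foldl (fun rs y => rs.set (tgt y) ((rs.getD (tgt y) 0) ||| msk y)) rows).length = rows.length := by
  intro l
  induction l with
  | nil => intro rows; rfl
  | cons y l ih => intro rows; simp only [List.foldl_cons]; rw [ih]; simp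

theorem pvOrFold_bits (tgt msk : Nat → Nat) :
    ∀ (l : List Nat) (rows : List Nat), (∀ y ∈ l, tgt y < rows.length) → ∀ (r t : Nat),
    ((l.foldl (fun rs y => rs.set (tgt y) ((rs.getD (tgt y) 0) ||| msk y)) rows).getD r 0).testBit t
      = ((rows.getD r 0).testBit t || l.any (fun y => (tgt y == r) && (msk y).testBit t)) := by
  intro l
  induction l with
  | nil => intro rows _ r t; simp
  | cons y l ih =>
    intro rows hin r t
    simp only [List.foldl_cons]
    rw [ih _ (by intro y' hy'; simp only [List.length_set]; exact hin y' (List.mem_cons_of_mem _ hy')) r t]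
    have hy : tgt y < rows.length := hin y List.mem_cons_self
    rw [pvGetD_set]
    by_cases hr : tgt y = r
    · rw [if_pos ⟨hr, hy⟩]
      simp only [hr, List.any_cons, beq_self_eq_true, Bool.true_and, Nat.testBit_or]
      rw [Bool.or_assoc]
    · rw [if_neg (fun hx => hr hx.1), List.any_cons,
        show (tgt y == r) = false from by simp [hr]]
      simp

-- canonical (Nat-indexed) forms of the two programs' loops
def pvMatchA (pa : List Int) (wN pwN hN : Nat) (img : List Int) (i j : Nat) : Bool :=
  (List.range hN).all fun y => (List.range pwN).all fun x =>
    !(pa.getD (y*pwN+x) 0 == 1 && !(img.getD ((i+y)*wN+(j+x)) 0 == 1))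

def pvApplyA (pb : List Int) (wN pwN hN : Nat) (img : List Int) (i j : Nat) : List Int :=
  (List.range hN).foldl (fun img y => (List.range pwN).foldl (fun img x =>
    if pb.getD (y*pwN+x) 0 == 1 then img.set ((i+y)*wN+(j+x)) (1:Int) else img) img) img

def pvStepA (pa pb : List Int) (wN pwN hN : Nat) (img : List Int) (i j : Nat) : List Int :=
  if pvMatchA pa wN pwN hN img i j then pvApplyA pb wN pwN hN img i j else img

def pvStepB (pa pb : List Int) (_wN pwN hN : Nat) (rows : List Nat) (i j : Nat) : List Nat :=
  if (List.range hN).all (fun y => ((rows.getD (i+y) 0) >>> j) &&& (pvPack pa pwN y) == pvPack pa pwN y) then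
    (List.range hN).foldl (fun rs y => rs.set (i+y) ((rs.getD (i+y) 0) ||| ((pvPack pb pwN y) <<< j))) rows
  else rows

def pvRows0 (img0 : List Int) (wN : Nat) : List Nat := (List.range 16).map (pvPack img0 wN)

def pvWriteback (img0 : List Int) (wN : Nat) (rows : List Nat) : List Int :=
  (List.range 16).foldl (fun img r => (List.range wN).foldl (fun img k =>
    if ((rows.getD r 0) >>> k) &&& 1 == 1 then img.set (r*wN+k) (1:Int) else img) img) img0

def pvAMain (pa pb : List Int) (wN pwN hN NiN NjN : Nat) (img0 : List Int) : List Int :=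
  (List.range NiN).foldl (fun img i => (List.range NjN).foldl (fun img j =>
    pvStepA pa pb wN pwN hN img i j) img) img0

def pvBMain (pa pb : List Int) (wN pwN hN NiN NjN : Nat) (rows : List Nat) : List Nat :=
  (List.range NiN).foldl (fun rs i => (List.range NjN).foldl (fun rs j =>
    pvStepB pa pb wN pwN hN rs i j) rs) rows

-- the coupling invariant between A's image state and B's packed rows
def pvInv (img0 : List Int) (wN : Nat) (img : List Int) (rows : List Nat) : Prop :=
  img.length = img0.length ∧ rows.length = 16 ∧
  (∀ r k : Nat, r < 16 → k < wN → ((rows.getD r 0).testBit k = true ↔ img.getD (r*wN+k) 0 = 1)) ∧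
  (∀ r k : Nat, wN ≤ k → (rows.getD r 0).testBit k = false) ∧
  (∀ idx : Nat, img.getD idx 0 = img0.getD idx 0 ∨ img.getD idx 0 = 1) ∧
  (∀ idx : Nat, 16*wN ≤ idx → img.getD idx 0 = img0.getD idx 0)

-- two folds over the same list preserve a relation if every step does
theorem pvFoldRel {α β γ : Type} (R : α → β → Prop) (fA : α → γ → α) (fB : β → γ → β) :
    ∀ (l : List γ), (∀ x ∈ l, ∀ a b, R a b → R (fA a x) (fB b x)) →
    ∀ a b, R a b → R (l.foldl fA a) (l.foldl fB b) := by
  intro l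
  induction l with
  | nil => intro _ a b h; exact h
  | cons x l ih =>
    intro hstep a b h
    exact ih (fun x' hx' => hstep x' (List.mem_cons_of_mem _ hx')) _ _
      (hstep x List.mem_cons_self a b h)

-- unfolding the nested apply loops into one fold over the pattern's cell list
theorem pvApplyA_cells (pb : List Int) (wN pwN hN : Nat) (img : List Int) (i j : Nat) :
    pvApplyA pb wN pwN hN img i j
      = ((List.range hN).flatMap (fun y => (List.range pwN).map fun x => (y,x))).foldl
          (fun im c => if pb.getD (c.1*pwN+c.2) 0 == 1 then im.set ((i+c.1)*wN+(j+c.2)) (1:Int) else im) img := by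
  rw [List.foldl_flatMap]
  simp only [List.foldl_map]
  rfl

theorem pvCells_mem (hN pwN : Nat) (c : Nat × Nat) :
    c ∈ (List.range hN).flatMap (fun y => (List.range pwN).map fun x => (y,x)) ↔ c.1 < hN ∧ c.2 < pwN := by
  cases c with
  | mk a b =>
    simp only [List.mem_flatMap, List.mem_map, List.mem_range]
    constructor
    · rintro ⟨y, hy, x, hx, hc⟩
      cases hc
      exact ⟨hy, hx⟩
    · rintro ⟨ha, hb⟩
      exact ⟨a, ha, b, hb, rfl⟩

theorem pvGridLt {r k w : Nat} (hr : r < 16) (hk : k < w) : r*w+k < 16*w := by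
  have h1 : r*w + k < (r+1)*w := by rw [Nat.add_mul]; omega
  have h2 : (r+1)*w ≤ 16*w := Nat.mul_le_mul_right _ (by omega)
  omega

theorem pvInv_init (img0 : List Int) (wN : Nat) (_hL : 16*wN ≤ img0.length) :
    pvInv img0 wN img0 (pvRows0 img0 wN) := by
  have hrow : ∀ r : Nat, (pvRows0 img0 wN).getD r 0 = if r < 16 then pvPack img0 wN r else 0 := by
    intro r
    by_cases hr : r < 16
    · rw [if_pos hr, List.getD_eq_getElem _ _ (by simpa [pvRows0] using hr)]
      simp [pvRows0]
    · rw [if_neg hr, List.getD_eq_default]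
      simp [pvRows0]
      omega
  refine ⟨rfl, by simp [pvRows0], ?_, ?_, ?_, ?_⟩
  · intro r k hr hk
    rw [hrow r, if_pos hr, pvPack_testBit]
    simp [hk]
  · intro r k hk
    rw [hrow r]
    split
    · rw [pvPack_testBit]
      simp
      omega
    · simp
  · intro idx
    left
    rfl
  · intro idx _
    rfl

theorem pvStep_preserves (img0 pa pb : List Int) (wN pwN hN : Nat) (img : List Int) (rows : List Nat)
    (hL : 16*wN ≤ img0.length) (hpw : 0 < pwN) (i j : Nat) (hi : i + hN ≤ 16) (hj : j + pwN ≤ wN)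
    (inv : pvInv img0 wN img rows) :
    pvInv img0 wN (pvStepA pa pb wN pwN hN img i j) (pvStepB pa pb wN pwN hN rows i j) := by
  obtain ⟨hlen, hrows, hbit, hhigh, hdelta, hout⟩ := inv
  -- the two match tests agree
  have hAiff : (pvMatchA pa wN pwN hN img i j = true)
      ↔ ∀ y, y < hN → ∀ x, x < pwN → pa.getD (y*pwN+x) 0 = 1 → img.getD ((i+y)*wN+(j+x)) 0 = 1 := by
    simp [pvMatchA, List.all_eq_true]
    exact ⟨fun h y hy x hx => imp_iff_not_or.mpr (h y hy x hx),
           fun h y hy x hx => imp_iff_not_or.mp (h y hy x hx)⟩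
  have hBiff : (((List.range hN).all (fun y =>
        ((rows.getD (i+y) 0) >>> j) &&& (pvPack pa pwN y) == pvPack pa pwN y)) = true)
      ↔ ∀ y, y < hN → ∀ t, t < pwN → pa.getD (y*pwN+t) 0 = 1 → (rows.getD (i+y) 0).testBit (j+t) = true := by
    simp only [List.all_eq_true, List.mem_range, beq_iff_eq]
    constructor
    · intro h y hy t htw hpa
      have := (pvLandEq _ _).mp (h y hy) t (by
        rw [pvPack_testBit]
        simp only [Bool.and_eq_true, decide_eq_true_eq, beq_iff_eq]
        exact ⟨htw, hpa⟩)
      rwa [Nat.testBit_shiftRight] at this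
    · intro h y hy
      rw [pvLandEq]
      intro t hP
      rw [pvPack_testBit] at hP
      simp only [Bool.and_eq_true, decide_eq_true_eq, beq_iff_eq] at hP
      rw [Nat.testBit_shiftRight]
      exact h y hy t hP.1 hP.2
  have hmatch : pvMatchA pa wN pwN hN img i j
      = ((List.range hN).all (fun y =>
          ((rows.getD (i+y) 0) >>> j) &&& (pvPack pa pwN y) == pvPack pa pwN y)) := by
    rw [Bool.eq_iff_iff, hAiff, hBiff]
    constructor
    · intro h y hy t htw hpa
      exact (hbit (i+y) (j+t) (by omega) (by omega)).mpr (h y hy t htw hpa)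
    · intro h y hy x hx hpa
      exact (hbit (i+y) (j+x) (by omega) (by omega)).mp (h y hy x hx hpa)
  unfold pvStepA pvStepB
  rw [hmatch]
  by_cases hm : ((List.range hN).all (fun y =>
      ((rows.getD (i+y) 0) >>> j) &&& (pvPack pa pwN y) == pvPack pa pwN y)) = true
  case neg =>
    rw [if_neg hm, if_neg hm]
    exact ⟨hlen, hrows, hbit, hhigh, hdelta, hout⟩
  case pos =>
    rw [if_pos hm, if_pos hm]
    -- pointwise characterisations of the two applications
    have hAget : ∀ q, (pvApplyA pb wN pwN hN img i j).getD q 0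
        = if ∃ c, c ∈ (List.range hN).flatMap (fun y => (List.range pwN).map fun x => (y,x)) ∧
              (pb.getD (c.1*pwN+c.2) 0 == 1) = true ∧ (i+c.1)*wN+(j+c.2) = q ∧ q < img.length
          then 1 else img.getD q 0 := by
      intro q
      rw [pvApplyA_cells, pvSetFold_getD]
    have hAlen : (pvApplyA pb wN pwN hN img i j).length = img.length := by
      rw [pvApplyA_cells, pvSetFold_len]
    have hBbits : ∀ r t : Nat,
        (((List.range hN).foldl (fun rs y =>
            rs.set (i+y) ((rs.getD (i+y) 0) ||| ((pvPack pb pwN y) <<< j))) rows).getD r 0).testBit t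
          = ((rows.getD r 0).testBit t
              || (List.range hN).any (fun y => ((i+y : Nat) == r) && ((pvPack pb pwN y <<< j).testBit t))) := by
      intro r t
      exact pvOrFold_bits (fun y => i+y) (fun y => pvPack pb pwN y <<< j) (List.range hN) rows
        (by intro y hy; rw [List.mem_range] at hy; show i + y < rows.length; omega) r t
    have hBlen : ((List.range hN).foldl (fun rs y =>
        rs.set (i+y) ((rs.getD (i+y) 0) ||| ((pvPack pb pwN y) <<< j))) rows).length = 16 := by
      rw [pvOrFold_len]
      exact hrows
    refine ⟨by rw [hAlen]; exact hlen, hBlen, ?_, ?_, ?_, ?_⟩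
    · -- packed bits still mirror the cells
      intro r k hr hk
      rw [hBbits r k, hAget (r*wN+k)]
      by_cases hstamp : ∃ y, y < hN ∧ i+y = r ∧ j ≤ k ∧ k-j < pwN ∧ pb.getD (y*pwN+(k-j)) 0 = 1
      · obtain ⟨y, hyh, hyr, hjk, hkp, hpb⟩ := hstamp
        have hany : ((List.range hN).any fun y => ((i+y : Nat) == r) && ((pvPack pb pwN y <<< j).testBit k)) = true := by
          rw [List.any_eq_true]
          refine ⟨y, List.mem_range.mpr hyh, ?_⟩
          rw [Nat.testBit_shiftLeft, pvPack_testBit,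
            show (pb.getD (y*pwN+(k-j)) 0 == 1) = true from beq_iff_eq.mpr hpb]
          simp [hyr, hjk, hkp]
        have hq : r*wN+k < img.length := by
          have := pvGridLt hr hk
          omega
        have heqtgt : (i+y)*wN+(j+(k-j)) = r*wN+k := by
          have hjkk : j+(k-j) = k := by omega
          rw [hyr, hjkk]
        have hex : ∃ c, c ∈ (List.range hN).flatMap (fun y => (List.range pwN).map fun x => (y,x)) ∧
            (pb.getD (c.1*pwN+c.2) 0 == 1) = true ∧ (i+c.1)*wN+(j+c.2) = r*wN+k ∧ r*wN+k < img.length :=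
          ⟨(y, k-j), (pvCells_mem _ _ _).mpr ⟨hyh, hkp⟩, by simpa using hpb, heqtgt, hq⟩
        rw [if_pos hex, hany]
        simp
      · have hany : ((List.range hN).any fun y => ((i+y : Nat) == r) && ((pvPack pb pwN y <<< j).testBit k)) = false := by
          rw [List.any_eq_false]
          intro y hy
          rw [List.mem_range] at hy
          rw [Nat.testBit_shiftLeft, pvPack_testBit]
          by_cases h1 : i+y = r
          · by_cases h2 : j ≤ k
            · by_cases h3 : k-j < pwN
              · have h5 : ¬ pb.getD (y*pwN+(k-j)) 0 = 1 := fun hpb => hstamp ⟨y, hy, h1, h2, h3, hpb⟩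
                have h6 : (pb.getD (y*pwN+(k-j)) 0 == 1) = false := beq_eq_false_iff_ne.mpr h5
                rw [h6]
                simp
              · simp [h3]
            · simp [show ¬ (k ≥ j) from h2]
          · simp [h1]
        have hexn : ¬ ∃ c, c ∈ (List.range hN).flatMap (fun y => (List.range pwN).map fun x => (y,x)) ∧
            (pb.getD (c.1*pwN+c.2) 0 == 1) = true ∧ (i+c.1)*wN+(j+c.2) = r*wN+k ∧ r*wN+k < img.length := by
          rintro ⟨c, hcmem, hcond, htgt, hq⟩
          obtain ⟨hc1, hc2⟩ := (pvCells_mem _ _ _).mp hcmem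
          have hdec := pvGridInj (show j+c.2 < wN by omega) hk htgt
          refine hstamp ⟨c.1, hc1, hdec.1, by omega, by omega, ?_⟩
          have hx2 : k - j = c.2 := by omega
          rw [hx2]
          exact beq_iff_eq.mp hcond
        rw [if_neg hexn, hany]
        simp only [Bool.or_false]
        exact hbit r k hr hk
    · -- no bits above the image width appear
      intro r k hwk
      rw [hBbits r k, hhigh r k hwk]
      simp only [Bool.false_or]
      rw [List.any_eq_false]
      intro y hy
      rw [Nat.testBit_shiftLeft, pvPack_testBit]
      have h3 : ¬ (k - j < pwN) := by omega
      simp [h3]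
    · -- cells only change to 1
      intro idx
      rw [hAget idx]
      split_ifs with h
      · right
        rfl
      · exact hdelta idx
    · -- nothing outside the 16×w grid changes
      intro idx hidx
      rw [hAget idx]
      rw [if_neg]
      · exact hout idx hidx
      · rintro ⟨c, hcmem, _, htgt, _⟩
        obtain ⟨hc1, hc2⟩ := (pvCells_mem _ _ _).mp hcmem
        have := pvGridLt (show i+c.1 < 16 by omega) (show j+c.2 < wN by omega)
        omega

theorem pvFinal (img0 : List Int) (wN : Nat) (img : List Int) (rows : List Nat)
    (_hL : 16*wN ≤ img0.length) (inv : pvInv img0 wN img rows) :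
    pvWriteback img0 wN rows = img := by
  obtain ⟨hlen, hrows, hbit, hhigh, hdelta, hout⟩ := inv
  have hwb : pvWriteback img0 wN rows
      = ((List.range 16).flatMap (fun r => (List.range wN).map fun k => (r,k))).foldl
          (fun im c => if ((rows.getD c.1 0) >>> c.2) &&& 1 == 1 then im.set (c.1*wN+c.2) (1:Int) else im) img0 := by
    rw [List.foldl_flatMap]
    simp only [List.foldl_map]
    rfl
  rw [hwb]
  apply List.ext_getElem
  · rw [pvSetFold_len]
    exact hlen.symm
  · intro n h1 h2
    rw [← List.getD_eq_getElem _ 0 h1, ← List.getD_eq_getElem _ 0 h2, pvSetFold_getD]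
    have hn : n < img0.length := by rw [← hlen]; exact h2
    by_cases hgrid : n < 16*wN
    · have hw0 : 0 < wN := by omega
      have hk : n % wN < wN := Nat.mod_lt _ hw0
      have hr : n / wN < 16 := by
        rw [Nat.div_lt_iff_lt_mul hw0]
        omega
      have hnk : (n / wN) * wN + n % wN = n := by
        rw [mul_comm]
        exact Nat.div_add_mod n wN
      by_cases hbit1 : (rows.getD (n / wN) 0).testBit (n % wN) = true
      · have hcond : (((rows.getD (n / wN) 0) >>> (n % wN)) &&& 1 == 1) = true := by
          rw [beq_iff_eq, pvAndOne, Nat.testBit_shiftRight, Nat.add_zero]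
          exact hbit1
        have hex : ∃ c, c ∈ (List.range 16).flatMap (fun r => (List.range wN).map fun k => (r,k)) ∧
            (((rows.getD c.1 0) >>> c.2) &&& 1 == 1) = true ∧ c.1*wN+c.2 = n ∧ n < img0.length :=
          ⟨(n / wN, n % wN), (pvCells_mem _ _ _).mpr ⟨hr, hk⟩, hcond, hnk, hn⟩
        rw [if_pos hex]
        have := (hbit (n / wN) (n % wN) hr hk).mp hbit1
        rw [hnk] at this
        exact this.symm
      · have hexn : ¬ ∃ c, c ∈ (List.range 16).flatMap (fun r => (List.range wN).map fun k => (r,k)) ∧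
            (((rows.getD c.1 0) >>> c.2) &&& 1 == 1) = true ∧ c.1*wN+c.2 = n ∧ n < img0.length := by
          rintro ⟨c, hcmem, hcond, htgt, _⟩
          obtain ⟨hc1, hc2⟩ := (pvCells_mem _ _ _).mp hcmem
          rw [beq_iff_eq, pvAndOne, Nat.testBit_shiftRight, Nat.add_zero] at hcond
          have hdec := pvGridInj hc2 hk (by rw [hnk]; exact htgt)
          exact hbit1 (by rw [← hdec.1, ← hdec.2]; exact hcond)
        rw [if_neg hexn]
        have himg : img.getD n 0 ≠ 1 := by
          intro h
          apply hbit1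
          rw [hbit (n / wN) (n % wN) hr hk, hnk]
          exact h
        rcases hdelta n with h | h
        · rw [h]
        · exact absurd h himg
    · rw [if_neg]
      · exact (hout n (Nat.le_of_not_lt hgrid)).symm
      · rintro ⟨c, hcmem, _, htgt, _⟩
        obtain ⟨hc1, hc2⟩ := (pvCells_mem _ _ _).mp hcmem
        have := pvGridLt hc1 hc2
        omega

theorem pvMain_inv (img0 pa pb : List Int) (wN pwN hN NiN NjN : Nat)
    (hL : 16*wN ≤ img0.length) (hpw : 0 < pwN)
    (hNi : NiN = (16 - (hN:Int) + 1).toNat) (hNj : NjN = ((wN:Int) - (pwN:Int) + 1).toNat) :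
    pvInv img0 wN (pvAMain pa pb wN pwN hN NiN NjN img0) (pvBMain pa pb wN pwN hN NiN NjN (pvRows0 img0 wN)) := by
  apply pvFoldRel (pvInv img0 wN)
  · intro i hi a b h
    apply pvFoldRel (pvInv img0 wN)
    · intro j hj a b h
      apply pvStep_preserves img0 pa pb wN pwN hN a b hL hpw i j
      · rw [List.mem_range] at hi; omega
      · rw [List.mem_range] at hj; omega
      · exact h
    · exact h
  · exact pvInv_init img0 wN hL



theorem pvAllCongr {α : Type} (l : List α) (p q : α → Bool) (h : ∀ x ∈ l, p x = q x) :
    l.all p = l.all q := by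
  induction l with
  | nil => rfl
  | cons x l ih =>
    simp only [List.all_cons, h x List.mem_cons_self,
      ih (fun y hy => h y (List.mem_cons_of_mem _ hy))]

theorem pvNormA (img0 pa pb : List Int) (pwN : Nat) (_hpw0 : 0 < pwN) :
    replace_pattern img0 pa pb (pwN : Int)
      = pvAMain pa pb (img0.length/16) pwN (pa.length/pwN)
          ((16 - ((pa.length/pwN : Nat) : Int) + 1).toNat)
          ((((img0.length/16 : Nat) : Int) - (pwN : Int) + 1).toNat) img0 := by
  have hw : PySem.Int.floordiv ((img0.length : Nat) : Int) 16 = ((img0.length/16 : Nat) : Int) := by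
    exact_mod_cast PySem.Int.floordiv_natCast img0.length 16
  have hh : PySem.Int.floordiv ((pa.length : Nat) : Int) ((pwN : Nat) : Int) = ((pa.length/pwN : Nat) : Int) :=
    PySem.Int.floordiv_natCast _ _
  unfold replace_pattern pvAMain pvStepA pvMatchA pvApplyA
  simp only [hw, hh, PySem.List.pyRange_one, Int.sub_zero, List.foldl_map, List.all_map,
    Function.comp_def, zero_add, ← Nat.cast_mul, ← Nat.cast_add, PySem.List.pyGetD_natCast,
    PySem.List.pySetD_natCast, Int.toNat_natCast]

theorem pvNormB_rows0 (img0 : List Int) (wN : Nat) :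
    (List.range 16).map (fun r => (List.range wN).foldl (fun acc k =>
      if img0.getD (r*wN+k) 0 == 1 then acc ||| 1 <<< k else acc) 0) = pvRows0 img0 wN := rfl

theorem pvNormB_main (pa pb : List Int) (wN pwN Ni Nj : Nat) (rows0v : List Nat) :
    (List.range Ni).foldl (fun rs i =>
      (List.range Nj).foldl (fun rs j =>
        if (List.range (pa.length/pwN)).all (fun y =>
            rs.getD (i+y) 0 >>> j &&&
              (((List.range (pa.length/pwN)).map (fun y' =>
                  (List.range pwN).foldl (fun p x =>
                    (if pa.getD (y'*pwN+x) 0 == 1 then p.1 ||| 1 <<< x else p.1,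
                     if pb.getD (y'*pwN+x) 0 == 1 then p.2 ||| 1 <<< x else p.2)) (0,0))).getD y (0,0)).1 ==
              (((List.range (pa.length/pwN)).map (fun y' =>
                  (List.range pwN).foldl (fun p x =>
                    (if pa.getD (y'*pwN+x) 0 == 1 then p.1 ||| 1 <<< x else p.1,
                     if pb.getD (y'*pwN+x) 0 == 1 then p.2 ||| 1 <<< x else p.2)) (0,0))).getD y (0,0)).1)
        then
          (List.range (pa.length/pwN)).foldl (fun rs y =>
            rs.set (i+y) (rs.getD (i+y) 0 |||
              (((List.range (pa.length/pwN)).map (fun y' =>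
                  (List.range pwN).foldl (fun p x =>
                    (if pa.getD (y'*pwN+x) 0 == 1 then p.1 ||| 1 <<< x else p.1,
                     if pb.getD (y'*pwN+x) 0 == 1 then p.2 ||| 1 <<< x else p.2)) (0,0))).getD y (0,0)).2 <<< j)) rs
        else rs) rs) rows0v
    = pvBMain pa pb wN pwN (pa.length/pwN) Ni Nj rows0v := by
  have hmask : ∀ y, y < pa.length/pwN →
      ((List.range (pa.length/pwN)).map (fun y' =>
        (List.range pwN).foldl (fun p x =>
          (if pa.getD (y'*pwN+x) 0 == 1 then p.1 ||| 1 <<< x else p.1,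
           if pb.getD (y'*pwN+x) 0 == 1 then p.2 ||| 1 <<< x else p.2)) (0,0))).getD y (0,0)
      = (pvPack pa pwN y, pvPack pb pwN y) := by
    intro y hy
    rw [List.getD_eq_getElem _ _ (by simpa using hy), List.getElem_map, List.getElem_range]
    rw [PySem.List.foldl_prod_mk
      (f := fun acc x => if pa.getD (y*pwN+x) 0 == 1 then acc ||| 1 <<< x else acc)
      (g := fun acc x => if pb.getD (y*pwN+x) 0 == 1 then acc ||| 1 <<< x else acc)]
    rfl
  unfold pvBMain
  apply PySem.List.foldl_congr_mem
  intro acc i _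
  apply PySem.List.foldl_congr_mem
  intro acc2 j _
  unfold pvStepB
  congr 1
  · congr 1
    apply pvAllCongr
    intro y hy
    rw [List.mem_range] at hy
    rw [hmask y hy]
  · apply PySem.List.foldl_congr_mem
    intro rs y hy
    rw [List.mem_range] at hy
    rw [hmask y hy]

theorem pvNormB (img0 pa pb : List Int) (pwN : Nat) (_hpw0 : 0 < pwN) :
    replace_pattern_alt img0 pa pb (pwN : Int)
      = pvWriteback img0 (img0.length/16)
          (pvBMain pa pb (img0.length/16) pwN (pa.length/pwN)
            ((16 - ((pa.length/pwN : Nat) : Int) + 1).toNat)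
            ((((img0.length/16 : Nat) : Int) - (pwN : Int) + 1).toNat)
            (pvRows0 img0 (img0.length/16))) := by
  have hw : PySem.Int.floordiv ((img0.length : Nat) : Int) 16 = ((img0.length/16 : Nat) : Int) := by
    exact_mod_cast PySem.Int.floordiv_natCast img0.length 16
  have hh : PySem.Int.floordiv ((pa.length : Nat) : Int) ((pwN : Nat) : Int) = ((pa.length/pwN : Nat) : Int) :=
    PySem.Int.floordiv_natCast _ _
  unfold replace_pattern_alt
  simp only [hw, hh, PySem.List.pyRange_one, Int.sub_zero, List.foldl_map, List.all_map, List.map_map,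
    Function.comp_def, zero_add, ← Nat.cast_mul, ← Nat.cast_add, PySem.List.pyGetD_natCast,
    PySem.List.pySetD_natCast, Int.toNat_natCast, show ((16:Int)).toNat = 16 from rfl]
  rw [pvNormB_rows0, pvNormB_main]
  rfl

-- with a nonpositive pattern height the original program changes nothing
theorem pvNegA (img0 pa pb : List Int) (pw : Int)
    (hneg : PySem.Int.floordiv ((pa.length : Nat) : Int) pw ≤ 0) :
    replace_pattern img0 pa pb pw = img0 := by
  unfold replace_pattern
  simp only [PySem.List.pyRange_one_eq_nil hneg, List.foldl_nil, List.all_nil, ite_self,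
    PySem.List.foldl_ignore]

theorem pvNegB (img0 pa pb : List Int) (pw : Int)
    (hneg : PySem.Int.floordiv ((pa.length : Nat) : Int) pw ≤ 0) :
    replace_pattern_alt img0 pa pb pw
      = pvWriteback img0 (img0.length/16) (pvRows0 img0 (img0.length/16)) := by
  have hw : PySem.Int.floordiv ((img0.length : Nat) : Int) 16 = ((img0.length/16 : Nat) : Int) := by
    exact_mod_cast PySem.Int.floordiv_natCast img0.length 16
  unfold replace_pattern_alt
  simp only [hw, PySem.List.pyRange_one_eq_nil hneg, List.foldl_nil, List.all_nil, ite_self,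
    PySem.List.foldl_ignore]
  simp only [PySem.List.pyRange_one, Int.sub_zero, List.foldl_map, List.map_map,
    Function.comp_def, zero_add, ← Nat.cast_mul, ← Nat.cast_add, PySem.List.pyGetD_natCast,
    PySem.List.pySetD_natCast, Int.toNat_natCast, show ((16:Int)).toNat = 16 from rfl]
  rw [pvNormB_rows0]
  rfl

theorem replace_pattern_eq_alt (img_data pattern_a pattern_b : List Int) (pattern_width : Int)
    (_hlen : pattern_a.length = pattern_b.length) (hpw : pattern_width ≠ 0) :
    replace_pattern img_data pattern_a pattern_b pattern_width
      = replace_pattern_alt img_data pattern_a pattern_b pattern_width := by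
  have hL : 16 * (img_data.length/16) ≤ img_data.length := by
    have := Nat.div_mul_le_self img_data.length 16
    omega
  rcases lt_trichotomy pattern_width 0 with hneg | hzero | hpos
  · have hneg' : PySem.Int.floordiv ((pattern_a.length : Nat) : Int) pattern_width ≤ 0 := by
      have hb := PySem.Int.mod_neg_bounds (a := ((pattern_a.length : Nat) : Int)) hneg
      have he := PySem.Int.floordiv_mul_add_mod ((pattern_a.length : Nat) : Int) pattern_width
      by_contra hf
      have h1 : 1 ≤ PySem.Int.floordiv ((pattern_a.length : Nat) : Int) pattern_width := by omega
      nlinarith [Int.natCast_nonneg pattern_a.length]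
    rw [pvNegA _ _ pattern_b _ hneg', pvNegB _ pattern_a pattern_b _ hneg']
    exact (pvFinal _ _ _ _ hL (pvInv_init _ _ hL)).symm
  · exact absurd hzero hpw
  · obtain ⟨pwN, rfl⟩ : ∃ n : Nat, pattern_width = (n:Int) :=
      ⟨pattern_width.toNat, (Int.toNat_of_nonneg (le_of_lt hpos)).symm⟩
    have hpw0 : 0 < pwN := by exact_mod_cast hpos
    rw [pvNormA _ _ _ _ hpw0, pvNormB _ _ _ _ hpw0]
    exact (pvFinal _ _ _ _ hL (pvMain_inv _ pattern_a pattern_b _ _ _ _ _ hL hpw0 rfl rfl)).symm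

-- ===== VERDICT (by name: the statement is the Claim_ definition above) =====
theorem replace_pattern_spec : Claim_equal_replace_pattern := by
  intro img_data pattern_a pattern_b pattern_width _ hpre
  unfold Spec_replace_pattern
  exact replace_pattern_eq_alt img_data pattern_a pattern_b pattern_width hpre.1 hpre.2
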